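-- pv_equiv track=rewrite | github.com/bay-puz/cspuz | cspuz/puzzle/url.py | encode_numbers
-- ===== SOURCE A (Python) =====
-- def _encode_pzpr(n, code):
--     if n < 0:
--         return ''
--     max = len(code) - 1
--     if n > max:
--         return _encode_pzpr(max, code) + _encode_pzpr(n - max, code)
--     return code[n]
--
-- def _encode_gz(n):
--     if n == 0:
--         return ''
--     return _encode_pzpr(n, '0ghijklmnopqrstuvwxyz')
--
-- def _encode_az(n):
--     if n == 0:
--         return ''
--     return _encode_pzpr(n, '0abcdefghijklmnopqrstuvwxyz')
--
-- def _encode_hex(dec):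
--     ad = ''
--     if dec >= 16:
--         ad = '-'
--     return ad + hex(dec)[2:]
--
-- def encode_numbers(height, width, numbers, zero_is_number=False, max_number=20):
--     ret = ''
--     spaces = 0
--     for y in range(height):
--         for x in range(width):
--             if numbers[y][x] > 0 or (numbers[y][x] == 0 and zero_is_number):
--                 if spaces > 0:
--                     ret += _encode_az(spaces) if max_number < 10 else _encode_gz(spaces)
--                     spaces = 0
--                 ret += str(numbers[y][x]) if max_number < 10 else _encode_hex(numbers[y][x])
--             else:
--                 spaces += 1
--     if spaces > 0:
--         ret += _encode_az(spaces) if max_number < 10 else _encode_gz(spaces)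
--
--     return ret
-- ===== SOURCE B (Python) =====
-- def _pzpr(n, code):
--     # iterative version of the pzpr run-length alphabet encoding
--     if n < 0:
--         return ''
--     m = len(code) - 1
--     parts = []
--     while n > m:
--         parts.append(code[m])
--         n -= m
--     parts.append(code[n])
--     return ''.join(parts)
--
--
-- def _enc_space(n, max_number):
--     if n == 0:
--         return ''
--     code = '0abcdefghijklmnopqrstuvwxyz' if max_number < 10 else '0ghijklmnopqrstuvwxyz'
--     return _pzpr(n, code)
--
--
-- def _enc_num(v, max_number):
--     if max_number < 10:
--         return str(v)
--     return ('-' if v >= 16 else '') + format(v, 'x')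
--
--
-- def encode_numbers(height, width, numbers, zero_is_number=False, max_number=20):
--     def is_num(v):
--         return v > 0 or (v == 0 and zero_is_number)
--
--     cells = [numbers[y][x] for y in range(height) for x in range(width)]
--     out = []
--     i, n = 0, len(cells)
--     while i < n:
--         if is_num(cells[i]):
--             out.append(_enc_num(cells[i], max_number))
--             i += 1
--         else:
--             j = i + 1
--             while j < n and not is_num(cells[j]):
--                 j += 1
--             out.append(_enc_space(j - i, max_number))
--             i = j
--     return ''.join(out)
-- ===== Notes on version B (the rewrite author's own statement) =====
-- stated objective: alternative
-- what changed: Replaces A's running spaces-counter with end-of-grid flush by flattening the grid once and partitioning it into maximal number/space runs (takeWhile/dropWhile scan), emitting one encoded chunk per run; the recursive pzpr alphabet encoder becomes an iterative loop.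
import Mathlib
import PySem

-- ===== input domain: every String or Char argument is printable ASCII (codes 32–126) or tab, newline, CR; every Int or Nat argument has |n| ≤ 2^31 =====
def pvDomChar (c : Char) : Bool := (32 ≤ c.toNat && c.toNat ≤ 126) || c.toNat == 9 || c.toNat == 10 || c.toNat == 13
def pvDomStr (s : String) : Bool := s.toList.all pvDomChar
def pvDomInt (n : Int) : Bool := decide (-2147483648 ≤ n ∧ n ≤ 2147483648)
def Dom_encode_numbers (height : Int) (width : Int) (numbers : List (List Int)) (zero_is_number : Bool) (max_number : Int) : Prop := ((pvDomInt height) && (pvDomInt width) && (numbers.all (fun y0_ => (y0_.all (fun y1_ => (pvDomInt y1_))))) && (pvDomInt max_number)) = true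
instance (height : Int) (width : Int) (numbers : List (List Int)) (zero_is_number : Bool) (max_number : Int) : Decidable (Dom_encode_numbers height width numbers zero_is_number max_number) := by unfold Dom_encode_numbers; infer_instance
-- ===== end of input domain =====

-- B replaces A's running spaces-counter (with end-of-grid flush) by flattening the grid once and
-- partitioning it into maximal number/space runs, one encoded chunk per run (objective: alternative).
-- Strings are modelled as List Char internally and converted to String at the boundary.

-- ===== PORT A =====
-- _encode_pzpr; the `m ≤ 0` branch is a totality guard only (A's two codes have m ≥ 1; Python
-- would recurse forever there), every reachable step is Python's.
def pzprA (n : Int) (code : List Char) : List Char :=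
  if n < 0 then []
  else
    let m : Int := (code.length : Int) - 1
    if _hm : m ≤ 0 then []
    else if _hn : n > m then pzprA m code ++ pzprA (n - m) code
    else [PySem.List.pyGetD code n ' ']
termination_by n.toNat
decreasing_by
  · omega
  · omega

-- _encode_gz
def gzA (n : Int) : List Char :=
  if n = 0 then [] else pzprA n "0ghijklmnopqrstuvwxyz".toList

-- _encode_az
def azA (n : Int) : List Char :=
  if n = 0 then [] else pzprA n "0abcdefghijklmnopqrstuvwxyz".toList

-- _encode_hex: hex(dec)[2:] is lowercase; for dec < 0 Python's hex gives '-0x…' so [2:] is 'x…'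
def hexA (dec : Int) : List Char :=
  (if dec ≥ 16 then ['-'] else []) ++
    (if dec < 0 then 'x' :: Nat.toDigits 16 (-dec).toNat else Nat.toDigits 16 dec.toNat)

-- the loop body of A: state is (ret, spaces)
def aStep (zero_is_number : Bool) (max_number : Int) (st : List Char × Int) (v : Int) :
    List Char × Int :=
  if v > 0 || (v == 0 && zero_is_number) then
    let st1 := if st.2 > 0 then
        (st.1 ++ (if max_number < 10 then azA st.2 else gzA st.2), (0 : Int))
      else st
    (st1.1 ++ (if max_number < 10 then PySem.Int.toChars v else hexA v), st1.2)
  else (st.1, st.2 + 1)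

-- the trailing 'if spaces > 0' flush after the loops
def aFinish (max_number : Int) (st : List Char × Int) : List Char :=
  if st.2 > 0 then st.1 ++ (if max_number < 10 then azA st.2 else gzA st.2) else st.1

def encode_numbers (height : Int) (width : Int) (numbers : List (List Int))
    (zero_is_number : Bool) (max_number : Int) : String :=
  String.ofList (aFinish max_number
    ((PySem.List.pyRange 0 height 1).foldl (fun st y =>
      (PySem.List.pyRange 0 width 1).foldl (fun st x =>
        aStep zero_is_number max_number st
          (PySem.List.pyGetD (PySem.List.pyGetD numbers y []) x 0)) st) ([], 0)))

-- ===== PORT B =====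
-- iterative _pzpr: the `1 ≤ m` conjunct is a totality guard (the codes used have m ≥ 1)
def pzprBLoop (code : List Char) (m : Int) (n : Int) (acc : List Char) : List Char :=
  if _h : 1 ≤ m ∧ m < n then
    pzprBLoop code m (n - m) (acc ++ [PySem.List.pyGetD code m ' '])
  else acc ++ [PySem.List.pyGetD code n ' ']
termination_by n.toNat
decreasing_by omega

def pzprB (n : Int) (code : List Char) : List Char :=
  if n < 0 then [] else pzprBLoop code ((code.length : Int) - 1) n []

-- _enc_space
def encSpaceB (n : Int) (max_number : Int) : List Char :=
  if n = 0 then []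
  else pzprB n (if max_number < 10 then "0abcdefghijklmnopqrstuvwxyz".toList
                else "0ghijklmnopqrstuvwxyz".toList)

-- _enc_num (format(v, 'x') puts '-' before the digits of |v| when v < 0)
def encNumB (v : Int) (max_number : Int) : List Char :=
  if max_number < 10 then PySem.Int.toChars v
  else (if v ≥ 16 then ['-'] else []) ++
    (if v < 0 then '-' :: Nat.toDigits 16 (-v).toNat else Nat.toDigits 16 v.toNat)

def isNumB (zero_is_number : Bool) (v : Int) : Bool :=
  v > 0 || (v == 0 && zero_is_number)

-- partition the flat cell list into maximal runs, emitting one chunk per run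
def runsB (zero_is_number : Bool) (max_number : Int) : List Int → List Char
  | [] => []
  | v :: rest =>
    if isNumB zero_is_number v then
      encNumB v max_number ++ runsB zero_is_number max_number rest
    else
      encSpaceB (((v :: rest).takeWhile (fun u => !isNumB zero_is_number u)).length : Int)
          max_number ++
        runsB zero_is_number max_number
          ((v :: rest).dropWhile (fun u => !isNumB zero_is_number u))
termination_by cells => cells.length
decreasing_by
  · simp
  · simp [*]
    exact List.length_dropWhile_le _ _

def encode_numbers_alt (height : Int) (width : Int) (numbers : List (List Int))
    (zero_is_number : Bool) (max_number : Int) : String :=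
  String.ofList (runsB zero_is_number max_number
    ((PySem.List.pyRange 0 height 1).flatMap (fun y =>
      (PySem.List.pyRange 0 width 1).map (fun x =>
        PySem.List.pyGetD (PySem.List.pyGetD numbers y []) x 0))))

-- ===== PRECONDITION & SPEC =====
-- Python A indexes numbers[y][x] for 0 ≤ y < height, 0 ≤ x < width and raises IndexError when the
-- grid is too small; no access happens at all when width ≤ 0. Pre_ admits exactly the inputs
-- where every such access is in range.
def Pre_encode_numbers (height : Int) (width : Int) (numbers : List (List Int))
    (zero_is_number : Bool) (max_number : Int) : Prop :=
  0 < width →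
    height.toNat ≤ numbers.length ∧
      ∀ row ∈ numbers.take height.toNat, width.toNat ≤ row.length

instance (height : Int) (width : Int) (numbers : List (List Int)) (zero_is_number : Bool) (max_number : Int) : Decidable (Pre_encode_numbers height width numbers zero_is_number max_number) := by unfold Pre_encode_numbers; infer_instance

def pvWitness_encode_numbers : Int × Int × List (List Int) × Bool × Int :=
  (2, 3, [[0, 5, 0], [0, 0, 17]], false, 20)

def Spec_encode_numbers (height : Int) (width : Int) (numbers : List (List Int)) (zero_is_number : Bool) (max_number : Int) (out : String) : Prop := out = encode_numbers_alt height width numbers zero_is_number max_number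
instance (height : Int) (width : Int) (numbers : List (List Int)) (zero_is_number : Bool) (max_number : Int) (out : String) : Decidable (Spec_encode_numbers height width numbers zero_is_number max_number out) := by unfold Spec_encode_numbers; infer_instance

-- ===== CLAIM (what is proved, stated in full; the proofs are below) =====
def Claim_equal_encode_numbers : Prop := ∀ (height : Int) (width : Int) (numbers : List (List Int)) (zero_is_number : Bool) (max_number : Int), Dom_encode_numbers height width numbers zero_is_number max_number → Pre_encode_numbers height width numbers zero_is_number max_number → Spec_encode_numbers height width numbers zero_is_number max_number (encode_numbers height width numbers zero_is_number max_number)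

-- ===== LEMMAS AND PROOFS =====

-- the iterative pzpr loop equals the recursive encoder (for codes with m ≥ 1)
lemma pzprBLoop_eq (code : List Char) (hm : 1 ≤ (code.length : Int) - 1) :
    ∀ (k : Nat) (n : Int), 0 ≤ n → n.toNat ≤ k → ∀ acc,
      pzprBLoop code ((code.length : Int) - 1) n acc = acc ++ pzprA n code := by
  intro k
  induction k with
  | zero =>
    intro n hn hk acc
    have hn0 : n = 0 := by omega
    subst hn0
    rw [pzprBLoop, dif_neg (by omega)]
    conv_rhs => rw [pzprA]
    rw [if_neg (by omega), dif_neg (by omega), dif_neg (by omega)]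
  | succ k ih =>
    intro n hn hk acc
    rw [pzprBLoop]
    by_cases h : 1 ≤ (code.length : Int) - 1 ∧ (code.length : Int) - 1 < n
    · rw [dif_pos h]
      rw [ih (n - ((code.length : Int) - 1)) (by omega) (by omega)]
      conv_rhs => rw [pzprA]
      rw [if_neg (by omega), dif_neg (by omega), dif_pos (by omega)]
      have hself : pzprA ((code.length : Int) - 1) code =
          [PySem.List.pyGetD code ((code.length : Int) - 1) ' '] := by
        rw [pzprA]
        rw [if_neg (by omega), dif_neg (by omega), dif_neg (by omega)]
      rw [hself, List.append_assoc]
    · rw [dif_neg h]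
      conv_rhs => rw [pzprA]
      rw [if_neg (by omega), dif_neg (by omega), dif_neg (by omega)]

lemma pzprB_eq_pzprA (code : List Char) (hm : 1 ≤ (code.length : Int) - 1) (n : Int) :
    pzprB n code = pzprA n code := by
  unfold pzprB
  by_cases hn : n < 0
  · rw [if_pos hn, pzprA, if_pos hn]
  · rw [if_neg hn, pzprBLoop_eq code hm n.toNat n (by omega) (by omega) []]
    simp

lemma encSpaceB_eq (n max_number : Int) :
    encSpaceB n max_number = if max_number < 10 then azA n else gzA n := by
  unfold encSpaceB azA gzA
  by_cases h0 : n = 0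
  · simp [h0]
  · rw [if_neg h0]
    by_cases hm : max_number < 10
    · rw [if_pos hm, if_pos hm, if_neg h0, pzprB_eq_pzprA _ (by decide)]
    · rw [if_neg hm, if_neg hm, if_neg h0, pzprB_eq_pzprA _ (by decide)]

-- the two per-number encoders agree on the values A ever encodes (v ≥ 0)
lemma encNumB_eq (v max_number : Int) (hv : 0 ≤ v) :
    encNumB v max_number =
      (if max_number < 10 then PySem.Int.toChars v else hexA v) := by
  unfold encNumB hexA
  by_cases hm : max_number < 10
  · simp [hm]
  · rw [if_neg hm, if_neg hm, if_neg (by omega : ¬ v < 0), if_neg (by omega : ¬ v < 0)]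

-- folding A's step over an all-spaces run just counts it
lemma foldl_aStep_spaces (zin : Bool) (mn : Int) (run : List Int)
    (h : ∀ u ∈ run, isNumB zin u = false) :
    ∀ acc s, run.foldl (aStep zin mn) (acc, s) = (acc, s + run.length) := by
  induction run with
  | nil => intro acc s; simp
  | cons u t ih =>
    intro acc s
    have hu : isNumB zin u = false := h u (by simp)
    rw [List.foldl_cons]
    have hstep : aStep zin mn (acc, s) u = (acc, s + 1) := by
      unfold aStep
      unfold isNumB at hu
      rw [if_neg (by simp [hu])]
    rw [hstep, ih (fun x hx => h x (by simp [hx]))]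
    simp
    omega

-- the heart: A's counter loop (from a flushed state) produces B's run decomposition
lemma foldl_aStep_eq_runsB (zin : Bool) (mn : Int) :
    ∀ (N : Nat) (cells : List Int), cells.length ≤ N → ∀ acc : List Char,
      aFinish mn (cells.foldl (aStep zin mn) (acc, 0)) = acc ++ runsB zin mn cells := by
  intro N
  induction N with
  | zero =>
    intro cells hlen acc
    have : cells = [] := by simpa using List.length_eq_zero_iff.mp (by omega)
    subst this
    simp [aFinish, runsB]
  | succ N ih =>
    intro cells hlen acc
    cases cells with
    | nil => simp [aFinish, runsB]
    | cons v rest =>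
      by_cases hv : isNumB zin v = true
      · have hv0 : 0 ≤ v := by
          unfold isNumB at hv
          simp at hv
          rcases hv with h | h <;> omega
        rw [List.foldl_cons]
        have hstep : aStep zin mn (acc, 0) v =
            (acc ++ (if mn < 10 then PySem.Int.toChars v else hexA v), 0) := by
          unfold aStep
          unfold isNumB at hv
          rw [if_pos hv]
          simp
        rw [hstep, ih rest (by simpa using Nat.lt_succ_iff.mp (by simpa using hlen)) _]
        rw [runsB, if_pos hv, encNumB_eq v mn hv0, List.append_assoc]
      · -- space run
        have hv' : isNumB zin v = false := by simp [hv]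
        set p : Int → Bool := fun u => !isNumB zin u with hp
        have hpv : p v = true := by simp [hp, hv']
        have hsplit : (v :: rest).takeWhile p ++ (v :: rest).dropWhile p = v :: rest :=
          List.takeWhile_append_dropWhile
        have hrun : ∀ u ∈ (v :: rest).takeWhile p, isNumB zin u = false := by
          intro u hu
          have := List.mem_takeWhile_imp hu
          simpa [hp] using this
        have hfold : (v :: rest).foldl (aStep zin mn) (acc, 0) =
            ((v :: rest).dropWhile p).foldl (aStep zin mn)
              (acc, (0 : Int) + ((v :: rest).takeWhile p).length) := by
          conv_lhs => rw [← hsplit]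
          rw [List.foldl_append, foldl_aStep_spaces zin mn _ hrun]
        have htklen : 0 < ((v :: rest).takeWhile p).length := by
          rw [List.takeWhile_cons_of_pos hpv]
          simp
        have hdroplen : ((v :: rest).dropWhile p).length ≤ rest.length := by
          rw [List.dropWhile_cons_of_pos hpv]
          exact List.length_dropWhile_le _ _
        rw [hfold]
        rw [runsB, if_neg (by simp [hv']), encSpaceB_eq]
        cases hdw : (v :: rest).dropWhile p with
        | nil =>
          simp only [List.foldl_nil]
          unfold aFinish
          rw [if_pos (by simp; exact_mod_cast htklen)]
          simp only [runsB, List.append_nil, zero_add]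
          rw [hp]
        | cons u rest'' =>
          have hu : isNumB zin u = true := by
            have := List.head?_dropWhile_not p (v :: rest)
            rw [hdw] at this
            simp [hp] at this
            exact this
          rw [List.foldl_cons]
          have hstep : aStep zin mn (acc, (0 : Int) + ((v :: rest).takeWhile p).length) u =
              (acc ++ (if mn < 10 then azA (((v :: rest).takeWhile p).length : Int)
                        else gzA (((v :: rest).takeWhile p).length : Int)) ++
                (if mn < 10 then PySem.Int.toChars u else hexA u), 0) := by
            unfold aStep
            unfold isNumB at hu
            rw [if_pos hu]
            rw [if_pos (by simp; exact_mod_cast htklen)]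
            simp
          rw [hstep]
          have hu0 : 0 ≤ u := by
            unfold isNumB at hu
            simp at hu
            rcases hu with h | h <;> omega
          have hlen'' : rest''.length ≤ N := by
            have h1 : rest''.length < ((v :: rest).dropWhile p).length := by
              rw [hdw]; simp
            simp only [List.length_cons] at hlen
            omega
          rw [ih rest'' hlen'' _]
          rw [runsB, if_pos hu, encNumB_eq u mn hu0]
          rw [hp]
          simp [List.append_assoc]

-- ===== VERDICT (by name: the statement is the Claim_ definition above) =====
theorem encode_numbers_spec : Claim_equal_encode_numbers := by
  intro height width numbers zin mn _ _
  unfold Spec_encode_numbers encode_numbers encode_numbers_alt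
  have h := foldl_aStep_eq_runsB zin mn
    ((PySem.List.pyRange 0 height 1).flatMap (fun y =>
      (PySem.List.pyRange 0 width 1).map (fun x =>
        PySem.List.pyGetD (PySem.List.pyGetD numbers y []) x 0))).length
    ((PySem.List.pyRange 0 height 1).flatMap (fun y =>
      (PySem.List.pyRange 0 width 1).map (fun x =>
        PySem.List.pyGetD (PySem.List.pyGetD numbers y []) x 0))) le_rfl []
  rw [List.foldl_flatMap] at h
  simp only [List.foldl_map, List.nil_append] at h
  exact congrArg String.ofList h
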